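-- pv_equiv track=rewrite | github.com/HardwareFuzz/openc910 | software/skiptrap/verify_registers_mem.py | calc_strb
-- ===== SOURCE A (Python) =====
-- def calc_strb(addr: int, size: int) -> int:
--     """根据地址/长度生成 byte-enable 掩码"""
--     mask = 0
--     base = addr & 0xF
--     for i in range(size):
--         bit = base + i
--         if bit >= 16:
--             # 正常情况下 store 不会跨越 16 字节窗口；若发生则回绕记录
--             bit %= 16
--         mask |= 1 << bit
--     return mask & 0xFFFF
-- ===== SOURCE B (Python) =====
-- def calc_strb(addr: int, size: int) -> int:
--     if size <= 0:
--         return 0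
--     if size >= 16:
--         return 0xFFFF
--     low = ((1 << size) - 1) << (addr & 0xF)
--     return (low | (low >> 16)) & 0xFFFF
-- ===== Notes on version B (the rewrite author's own statement) =====
-- stated objective: faster
-- what changed: Replaced the per-byte loop that ORs one bit per iteration with a closed-form contiguous bitmask ((1<<size)-1 shifted by addr&0xF, folded back with >>16 for the 16-byte wraparound), with early returns 0 for size<=0 and 0xFFFF for size>=16.
import Mathlib
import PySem

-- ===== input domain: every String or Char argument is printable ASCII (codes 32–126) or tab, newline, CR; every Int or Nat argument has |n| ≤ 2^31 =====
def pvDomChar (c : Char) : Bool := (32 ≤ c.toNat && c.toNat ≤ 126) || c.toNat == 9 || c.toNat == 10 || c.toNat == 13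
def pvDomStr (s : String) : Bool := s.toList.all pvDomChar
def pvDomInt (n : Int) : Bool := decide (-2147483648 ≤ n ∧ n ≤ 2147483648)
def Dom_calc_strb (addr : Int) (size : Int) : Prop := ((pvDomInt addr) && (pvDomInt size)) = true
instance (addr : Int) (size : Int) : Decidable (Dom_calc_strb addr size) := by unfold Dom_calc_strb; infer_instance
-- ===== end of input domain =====

-- B replaces A's O(size) bit-by-bit loop with an O(1) closed-form contiguous mask with 16-bit wraparound (timed measurably faster).

-- ===== PORT A =====
-- `1 << bit` is ported as `1 <<< bit.toNat`: whenever the loop body runs, bit ≥ 0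
-- (base = addr & 0xF ≥ 0 and i ≥ 0 from range(size)), so `.toNat` is exact there.
def calc_strb (addr : Int) (size : Int) : Int :=
  let base := PySem.Int.band addr 15
  let mask := (PySem.List.pyRange 0 size 1).foldl (fun mask i =>
      let bit := base + i
      let bit := if bit ≥ 16 then PySem.Int.mod bit 16 else bit
      PySem.Int.bor mask (1 <<< bit.toNat)) 0
  PySem.Int.band mask 65535

-- ===== PORT B =====
-- shift counts: size ∈ [1,16) in the live branch and addr & 0xF ≥ 0, so `.toNat` is exact.
def calc_strb_alt (addr : Int) (size : Int) : Int :=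
  if size ≤ 0 then 0
  else if 16 ≤ size then 65535
  else
    let low := ((1 <<< size.toNat) - 1) <<< (PySem.Int.band addr 15).toNat
    PySem.Int.band (PySem.Int.bor low (low >>> (16 : Nat))) 65535

-- ===== PRECONDITION & SPEC =====
def Spec_calc_strb (addr : Int) (size : Int) (out : Int) : Prop := out = calc_strb_alt addr size
instance (addr : Int) (size : Int) (out : Int) : Decidable (Spec_calc_strb addr size out) := by unfold Spec_calc_strb; infer_instance

-- ===== CLAIM (what is proved, stated in full; the proofs are below) =====
def Claim_equal_calc_strb : Prop := ∀ (addr : Int) (size : Int), Dom_calc_strb addr size → Spec_calc_strb addr size (calc_strb addr size)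

-- ===== LEMMAS AND PROOFS =====

-- A's loop body, named for the proofs (definitionally the lambda inside calc_strb)
def pvF (base : Int) : Int → Int → Int := fun mask i =>
  let bit := base + i
  let bit := if bit ≥ 16 then PySem.Int.mod bit 16 else bit
  PySem.Int.bor mask (1 <<< bit.toNat)

theorem pv_calc_strb_eq (addr size : Int) :
    calc_strb addr size =
      PySem.Int.band ((PySem.List.pyRange 0 size 1).foldl (pvF (PySem.Int.band addr 15)) 0) 65535 := rfl

theorem pv_band15_bounds (a : Int) :
    0 ≤ PySem.Int.band a 15 ∧ PySem.Int.band a 15 < 16 := by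
  by_cases h : 0 ≤ a
  · simp only [PySem.Int.band, if_pos h, if_pos (by norm_num : (0:Int) ≤ 15)]
    have := Nat.and_le_right (n := a.toNat) (m := (15:Int).toNat)
    omega
  · simp only [PySem.Int.band, if_neg h, if_pos (by norm_num : (0:Int) ≤ 15)]
    omega

theorem pv_foldl_const (f : Int → Int → Int) (c : Int) (l : List Int)
    (h : ∀ x ∈ l, f c x = c) : l.foldl f c = c := by
  induction l with
  | nil => rfl
  | cons a t ih =>
    simp only [List.foldl_cons, h a (List.mem_cons_self ..)]
    exact ih fun x hx => h x (List.mem_cons_of_mem _ hx)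

theorem pv_or65535 (t : Nat) (ht : t < 16) :
    PySem.Int.bor 65535 (1 <<< t) = 65535 := by
  interval_cases t <;> decide

theorem pv_step_big (base i : Int) (hb0 : 0 ≤ base) (hb : base < 16) (hi : 16 ≤ i) :
    pvF base 65535 i = 65535 := by
  simp only [pvF]
  rw [if_pos (by omega : base + i ≥ 16)]
  have h16 : (0:Int) < 16 := by norm_num
  have hm0 : 0 ≤ PySem.Int.mod (base + i) 16 := by
    simpa [PySem.Int.mod, Int.fmod_eq_emod] using Int.emod_nonneg (base + i) (by norm_num)
  have hm : PySem.Int.mod (base + i) 16 < 16 := by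
    simpa [PySem.Int.mod, Int.fmod_eq_emod] using Int.emod_lt_of_pos (base + i) h16
  exact pv_or65535 _ (by omega)

theorem pv_first16 (base : Int) (hb0 : 0 ≤ base) (hb : base < 16) :
    (PySem.List.pyRange 0 16 1).foldl (pvF base) 0 = 65535 := by
  interval_cases base <;> decide

theorem pv_small (base size : Int) (hb0 : 0 ≤ base) (hb : base < 16)
    (hs1 : 1 ≤ size) (hs : size < 16) :
    PySem.Int.band ((PySem.List.pyRange 0 size 1).foldl (pvF base) 0) 65535 =
      PySem.Int.band
        (PySem.Int.bor (((1 <<< size.toNat) - 1) <<< base.toNat)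
          ((((1 <<< size.toNat) - 1) <<< base.toNat) >>> (16 : Nat))) 65535 := by
  interval_cases base <;> interval_cases size <;> decide

-- ===== VERDICT (by name: the statement is the Claim_ definition above) =====
theorem calc_strb_spec : Claim_equal_calc_strb := by
  intro addr size _
  unfold Spec_calc_strb calc_strb_alt
  obtain ⟨hb0, hb⟩ := pv_band15_bounds addr
  rw [pv_calc_strb_eq]
  by_cases h0 : size ≤ 0
  · rw [if_pos h0, PySem.List.pyRange_one_eq_nil (by omega)]
    simp [PySem.Int.band]
  · rw [if_neg h0]
    by_cases h16 : 16 ≤ size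
    · rw [if_pos h16]
      rw [PySem.List.pyRange_one_append 0 16 size (by norm_num) h16, List.foldl_append,
        pv_first16 _ hb0 hb,
        pv_foldl_const _ _ _ (fun x hx =>
          pv_step_big _ x hb0 hb ((PySem.List.mem_pyRange_one.mp hx).1))]
      decide
    · rw [if_neg h16]
      exact pv_small _ _ hb0 hb (by omega) (by omega)
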